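-- pv_equiv track=rewrite | github.com/CederGroupHub/AutoEMX | autoemx/config/schema_models/quantification.py | derive_reference_lines_by_element
-- ===== SOURCE A (Python) =====
-- from typing import Any, Dict, List, Optional, Sequence
--
-- def derive_reference_lines_by_element(
--     reference_values_by_el_line: Dict[str, Any],
--     preferred_lines: Optional[Sequence[str]] = None,
-- ) -> Dict[str, str]:
--     """Build a deterministic element->line map from available reference values."""
--     priority: Dict[str, int] = {
--         str(line): idx for idx, line in enumerate(preferred_lines or [])
--     }
--
--     selected: Dict[str, str] = {}
--     for raw_key in sorted(reference_values_by_el_line):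
--         key = str(raw_key).strip()
--         if "_" not in key:
--             continue
--
--         element, line = key.split("_", 1)
--         element = element.strip()
--         line = line.strip()
--         if not element or not line:
--             continue
--
--         existing = selected.get(element)
--         if existing is None:
--             selected[element] = key
--             continue
--
--         existing_line = existing.split("_", 1)[1]
--         existing_rank = priority.get(existing_line, len(priority))
--         candidate_rank = priority.get(line, len(priority))
--
--         if candidate_rank < existing_rank or (
--             candidate_rank == existing_rank and key < existing
--         ):
--             selected[element] = key
--
--     return dict(sorted(selected.items()))
-- ===== SOURCE B (Python) =====
-- def derive_reference_lines_by_element(reference_values_by_el_line, preferred_lines=None):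
--     """Group candidate keys by element, then pick each element's best with one min()."""
--     priority = {str(line): idx for idx, line in enumerate(preferred_lines or [])}
--     default_rank = len(priority)
--
--     groups = {}
--     for raw_key in reference_values_by_el_line:
--         key = str(raw_key).strip()
--         if "_" not in key:
--             continue
--         element, line = key.split("_", 1)
--         element = element.strip()
--         line = line.strip()
--         if not element or not line:
--             continue
--         groups.setdefault(element, []).append(key)
--
--     return {
--         element: min(
--             groups[element],
--             key=lambda k: (priority.get(k.split("_", 1)[1].strip(), default_rank), k),
--         )
--         for element in sorted(groups)
--     }
-- ===== Notes on version B (the rewrite author's own statement) =====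
-- stated objective: alternative
-- what changed: A sorts all dict keys and keeps a running best-so-far per element in one pass with an incremental compare-and-replace; B builds a per-element index of candidate keys in one unsorted scan and then picks each element's winner with a single min() over its group (sorting only the distinct elements), a group-then-reduce decomposition with no global key sort.
import Mathlib
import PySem

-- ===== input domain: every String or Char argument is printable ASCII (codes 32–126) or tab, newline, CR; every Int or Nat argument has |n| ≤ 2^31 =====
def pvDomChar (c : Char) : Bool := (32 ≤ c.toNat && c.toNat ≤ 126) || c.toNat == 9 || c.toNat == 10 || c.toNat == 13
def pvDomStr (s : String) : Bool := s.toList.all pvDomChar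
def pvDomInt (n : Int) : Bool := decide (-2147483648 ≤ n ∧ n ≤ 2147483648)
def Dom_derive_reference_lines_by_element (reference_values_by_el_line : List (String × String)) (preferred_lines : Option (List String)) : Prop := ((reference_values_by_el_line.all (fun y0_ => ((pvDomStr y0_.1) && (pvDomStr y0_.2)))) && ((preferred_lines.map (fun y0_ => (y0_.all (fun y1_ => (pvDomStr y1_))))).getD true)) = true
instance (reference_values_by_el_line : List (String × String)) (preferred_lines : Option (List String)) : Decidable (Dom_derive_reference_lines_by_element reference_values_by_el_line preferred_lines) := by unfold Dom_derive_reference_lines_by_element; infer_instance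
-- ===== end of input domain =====

-- B replaces A's global key sort + running-best dict with a group-by-element index and one min() per group (different decomposition, no global sort); return value only (neither mutates its arguments).

-- ===== PORT A =====
-- literal transliteration of A; the input dict is the association list: its keys are the
-- first-occurrence-deduplicated first components (PySem.List.dedup), values are never read.
def derive_reference_lines_by_element (reference_values_by_el_line : List (String × String)) (preferred_lines : Option (List String)) : List (String × String) :=
  -- priority = {str(line): idx for idx, line in enumerate(preferred_lines or [])}
  let priority : PySem.Dict String Int :=
    (PySem.List.enumerate ((preferred_lines.getD []))).foldl (fun d p => d.insert p.2 p.1) PySem.Dict.empty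
  -- for raw_key in sorted(reference_values_by_el_line):
  let selected : PySem.Dict String String :=
    (PySem.List.sorted (PySem.List.dedup (reference_values_by_el_line.map Prod.fst)) (fun x => x) false).foldl
      (fun sel raw_key =>
        let key := PySem.Str.strip raw_key
        if PySem.Str.isIn "_" key then
          -- element, line = key.split("_", 1)  (two parts are guaranteed since "_" in key)
          let parts := (PySem.Str.splitMax? key "_" 1).getD []
          let element := PySem.Str.strip (parts.getD 0 "")
          let line := PySem.Str.strip (parts.getD 1 "")
          if element = "" ∨ line = "" then sel
          else
            match sel.get? element with
            | none => sel.insert element key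
            | some existing =>
              let existing_line := ((PySem.Str.splitMax? existing "_" 1).getD []).getD 1 ""
              let existing_rank := priority.getD existing_line (priority.size : Int)
              let candidate_rank := priority.getD line (priority.size : Int)
              if candidate_rank < existing_rank ∨ (candidate_rank = existing_rank ∧ key < existing)
              then sel.insert element key else sel
        else sel)
      PySem.Dict.empty
  -- return dict(sorted(selected.items()))  (tuples compare lexicographically)
  PySem.List.sorted2 selected.items (fun p => p.1) (fun p => p.2) false

-- ===== PORT B =====
-- literal transliteration of Source B: build groups (element -> candidate keys), then one min() per group.
def derive_reference_lines_by_element_alt (reference_values_by_el_line : List (String × String)) (preferred_lines : Option (List String)) : List (String × String) :=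
  let priority : PySem.Dict String Int :=
    (PySem.List.enumerate ((preferred_lines.getD []))).foldl (fun d p => d.insert p.2 p.1) PySem.Dict.empty
  let default_rank : Int := priority.size
  -- for raw_key in reference_values_by_el_line:  (dict iteration = deduplicated keys, insertion order)
  let groups : PySem.Dict String (List String) :=
    (PySem.List.dedup (reference_values_by_el_line.map Prod.fst)).foldl
      (fun g raw_key =>
        let key := PySem.Str.strip raw_key
        if PySem.Str.isIn "_" key then
          let parts := (PySem.Str.splitMax? key "_" 1).getD []
          let element := PySem.Str.strip (parts.getD 0 "")
          let line := PySem.Str.strip (parts.getD 1 "")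
          if element = "" ∨ line = "" then g
          else g.modify element [] (fun l => l ++ [key])  -- groups.setdefault(element, []).append(key)
        else g)
      PySem.Dict.empty
  -- {element: min(groups[element], key=...) for element in sorted(groups)}
  ((PySem.List.sorted groups.keys (fun x => x) false).foldl
    (fun d element =>
      d.insert element
        ((PySem.List.min2? (groups.getD element [])
            (fun k => priority.getD (PySem.Str.strip (((PySem.Str.splitMax? k "_" 1).getD []).getD 1 "")) default_rank)
            (fun k => k)).getD ""))  -- groups[element] is nonempty, min never sees []
    PySem.Dict.empty).items

-- ===== PRECONDITION & SPEC =====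
-- helpers for Pre_ (independent of the ports): the shared parsing of one raw dict key
def pvRawline (k : String) : String := ((PySem.Str.splitMax? k "_" 1).getD []).getD 1 ""

def pvParse (raw : String) : Option (String × String × String) :=
  let key := PySem.Str.strip raw
  if PySem.Str.isIn "_" key then
    let parts := (PySem.Str.splitMax? key "_" 1).getD []
    let element := PySem.Str.strip (parts.getD 0 "")
    let line := PySem.Str.strip (parts.getD 1 "")
    if element = "" ∨ line = "" then none else some (element, line, key)
  else none

def pvPriority (preferred_lines : Option (List String)) : PySem.Dict String Int :=
  (PySem.List.enumerate ((preferred_lines.getD []))).foldl (fun d p => d.insert p.2 p.1) PySem.Dict.empty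

def pvRank (pr : PySem.Dict String Int) (s : String) : Int := pr.getD s (pr.size : Int)

-- Pre_ excludes inputs where some accepted key's line part changes its priority rank when
-- stripped of surrounding whitespace: for such a key the intended priority is ambiguous and
-- no caller would specify the winner (A ranks the incumbent by its stored, unstripped line
-- but a challenger by its stripped line; B always ranks by the stripped line — both readings
-- are defensible on this corner).
def Pre_derive_reference_lines_by_element (reference_values_by_el_line : List (String × String)) (preferred_lines : Option (List String)) : Prop :=
  (reference_values_by_el_line.all (fun p =>
    match pvParse p.1 with
    | none => true
    | some t => pvRank (pvPriority preferred_lines) (pvRawline t.2.2) == pvRank (pvPriority preferred_lines) t.2.1)) = true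

instance (reference_values_by_el_line : List (String × String)) (preferred_lines : Option (List String)) : Decidable (Pre_derive_reference_lines_by_element reference_values_by_el_line preferred_lines) := by unfold Pre_derive_reference_lines_by_element; infer_instance

def pvWitness_derive_reference_lines_by_element : (List (String × String)) × Option (List String) :=
  ([("Fe_Ka", "1.0"), ("Fe_Kb", "2.0"), ("Ni_La", "3.0")], some ["Kb", "Ka"])

def Spec_derive_reference_lines_by_element (reference_values_by_el_line : List (String × String)) (preferred_lines : Option (List String)) (out : List (String × String)) : Prop := out = derive_reference_lines_by_element_alt reference_values_by_el_line preferred_lines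
instance (reference_values_by_el_line : List (String × String)) (preferred_lines : Option (List String)) (out : List (String × String)) : Decidable (Spec_derive_reference_lines_by_element reference_values_by_el_line preferred_lines out) := by unfold Spec_derive_reference_lines_by_element; infer_instance

-- ===== CLAIM (what is proved, stated in full; the proofs are below) =====
def Claim_equal_derive_reference_lines_by_element : Prop := ∀ (reference_values_by_el_line : List (String × String)) (preferred_lines : Option (List String)), Dom_derive_reference_lines_by_element reference_values_by_el_line preferred_lines → Pre_derive_reference_lines_by_element reference_values_by_el_line preferred_lines → Spec_derive_reference_lines_by_element reference_values_by_el_line preferred_lines (derive_reference_lines_by_element reference_values_by_el_line preferred_lines)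

-- ===== LEMMAS AND PROOFS =====

-- the (rank of stripped line, key) lexicographic key both programs minimise under Pre_
def pvF (pr : PySem.Dict String Int) (k : String) : Lex (Int × String) :=
  toLex (pvRank pr (PySem.Str.strip (pvRawline k)), k)

-- A's loop step, on parsed triples (element, line, key)
def pvStepT (pr : PySem.Dict String Int) (sel : PySem.Dict String String) (t : String × String × String) : PySem.Dict String String :=
  match sel.get? t.1 with
  | none => sel.insert t.1 t.2.2
  | some existing =>
    if pvRank pr t.2.1 < pvRank pr (pvRawline existing) ∨
       (pvRank pr t.2.1 = pvRank pr (pvRawline existing) ∧ t.2.2 < existing)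
    then sel.insert t.1 t.2.2 else sel

-- the folding function of min? with key pvF
def pvG (pr : PySem.Dict String Int) (acc : Option String) (k : String) : Option String :=
  match acc with
  | none => some k
  | some m => if pvF pr k < pvF pr m then some k else some m

def pvGoodT (pr : PySem.Dict String Int) (t : String × String × String) : Prop :=
  t.2.1 = PySem.Str.strip (pvRawline t.2.2) ∧ pvRank pr (pvRawline t.2.2) = pvRank pr t.2.1

def pvWF (pr : PySem.Dict String Int) (sel : PySem.Dict String String) : Prop :=
  ∀ e k, sel.get? e = some k → pvRank pr (pvRawline k) = pvRank pr (PySem.Str.strip (pvRawline k))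

lemma pvParse_shape {raw e l k : String} (h : pvParse raw = some (e, l, k)) :
    l = PySem.Str.strip (pvRawline k) := by
  unfold pvParse at h
  simp only at h
  split at h
  · split at h
    · exact absurd h (by simp)
    · simp only [Option.some.injEq, Prod.mk.injEq] at h
      obtain ⟨-, hl, hk⟩ := h
      subst hk hl
      rfl
  · exact absurd h (by simp)

lemma pvStepA_eq (pr : PySem.Dict String Int) (sel : PySem.Dict String String) (raw : String) :
    (let key := PySem.Str.strip raw
     if PySem.Str.isIn "_" key then
       let parts := (PySem.Str.splitMax? key "_" 1).getD []
       let element := PySem.Str.strip (parts.getD 0 "")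
       let line := PySem.Str.strip (parts.getD 1 "")
       if element = "" ∨ line = "" then sel
       else
         match sel.get? element with
         | none => sel.insert element key
         | some existing =>
           let existing_line := ((PySem.Str.splitMax? existing "_" 1).getD []).getD 1 ""
           let existing_rank := pr.getD existing_line (pr.size : Int)
           let candidate_rank := pr.getD line (pr.size : Int)
           if candidate_rank < existing_rank ∨ (candidate_rank = existing_rank ∧ key < existing)
           then sel.insert element key else sel
     else sel)
    = (match pvParse raw with
       | none => sel
       | some t => pvStepT pr sel t) := by
  unfold pvParse pvStepT pvRank pvRawline
  simp only
  split
  · split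
    · rfl
    · rfl
  · rfl

lemma pvStepB_eq (g : PySem.Dict String (List String)) (raw : String) :
    (let key := PySem.Str.strip raw
     if PySem.Str.isIn "_" key then
       let parts := (PySem.Str.splitMax? key "_" 1).getD []
       let element := PySem.Str.strip (parts.getD 0 "")
       let line := PySem.Str.strip (parts.getD 1 "")
       if element = "" ∨ line = "" then g
       else g.modify element [] (fun l => l ++ [key])
     else g)
    = (match pvParse raw with
       | none => g
       | some t => g.modify t.1 [] (fun l => l ++ [t.2.2])) := by
  unfold pvParse
  simp only
  split
  · split
    · rfl
    · rfl
  · rfl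

lemma pvF_inj (pr : PySem.Dict String Int) {k k' : String} (h : pvF pr k = pvF pr k') : k = k' := by
  have := congrArg (fun x => (ofLex x).2) h
  simpa [pvF] using this

lemma pv_min?_perm (pr : PySem.Dict String Int) {xs ys : List String} (h : xs.Perm ys) :
    PySem.List.min? xs (pvF pr) = PySem.List.min? ys (pvF pr) := by
  rcases hx : PySem.List.min? xs (pvF pr) with _ | m
  · rcases hy : PySem.List.min? ys (pvF pr) with _ | m'
    · rfl
    · rw [PySem.List.min?_eq_none_iff] at hx
      subst hx
      rw [h.nil_eq.symm] at hy
      simp [PySem.List.min?] at hy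
  · rcases hy : PySem.List.min? ys (pvF pr) with _ | m'
    · rw [PySem.List.min?_eq_none_iff] at hy
      subst hy
      rw [h.symm.nil_eq.symm] at hx
      simp [PySem.List.min?] at hx
    · have hm : m ∈ xs := PySem.List.min?_mem hx
      have hm' : m' ∈ ys := PySem.List.min?_mem hy
      have h1 : pvF pr m ≤ pvF pr m' := PySem.List.min?_isMin hx m' (h.symm.subset hm')
      have h2 : pvF pr m' ≤ pvF pr m := PySem.List.min?_isMin hy m (h.subset hm)
      have := pvF_inj pr (le_antisymm h1 h2)
      rw [this]

lemma pv_min?_eq_foldl (pr : PySem.Dict String Int) (xs : List String) :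
    PySem.List.min? xs (pvF pr) = xs.foldl (pvG pr) none := by
  unfold PySem.List.min? pvG
  congr 1
  funext acc k
  cases acc with
  | none => rfl
  | some m =>
    by_cases h : pvF pr k < pvF pr m
    · simp [h]
    · simp [h]

lemma pvStepT_none (pr : PySem.Dict String Int) {sel : PySem.Dict String String}
    {t : String × String × String} (h : sel.get? t.1 = none) :
    pvStepT pr sel t = sel.insert t.1 t.2.2 := by
  unfold pvStepT; rw [h]

lemma pvStepT_some (pr : PySem.Dict String Int) {sel : PySem.Dict String String}
    {t : String × String × String} {ex : String} (h : sel.get? t.1 = some ex) :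
    pvStepT pr sel t =
      if pvRank pr t.2.1 < pvRank pr (pvRawline ex) ∨
         (pvRank pr t.2.1 = pvRank pr (pvRawline ex) ∧ t.2.2 < ex)
      then sel.insert t.1 t.2.2 else sel := by
  unfold pvStepT; rw [h]

lemma pvWF_step (pr : PySem.Dict String Int) {sel : PySem.Dict String String}
    {t : String × String × String} (hg : pvGoodT pr t) (hwf : pvWF pr sel) :
    pvWF pr (pvStepT pr sel t) := by
  have hins : pvWF pr (sel.insert t.1 t.2.2) := by
    intro e k hk
    by_cases he : e = t.1
    · subst he
      rw [PySem.Dict.get?_insert_self] at hk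
      cases hk
      rw [hg.2, hg.1]
    · rw [PySem.Dict.get?_insert_of_ne _ _ he] at hk
      exact hwf e k hk
  cases h : sel.get? t.1 with
  | none => rw [pvStepT_none pr h]; exact hins
  | some existing =>
    rw [pvStepT_some pr h]
    split
    · exact hins
    · exact hwf

lemma pvStepT_get_ne (pr : PySem.Dict String Int) (sel : PySem.Dict String String)
    (t : String × String × String) {e : String} (he : e ≠ t.1) :
    (pvStepT pr sel t).get? e = sel.get? e := by
  cases h : sel.get? t.1 with
  | none => rw [pvStepT_none pr h]; exact PySem.Dict.get?_insert_of_ne _ _ he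
  | some existing =>
    rw [pvStepT_some pr h]
    split
    · exact PySem.Dict.get?_insert_of_ne _ _ he
    · rfl

lemma pvStepT_get_self (pr : PySem.Dict String Int) (sel : PySem.Dict String String)
    (t : String × String × String) (hg : pvGoodT pr t) (hwf : pvWF pr sel) :
    (pvStepT pr sel t).get? t.1 = pvG pr (sel.get? t.1) t.2.2 := by
  cases h : sel.get? t.1 with
  | none =>
    rw [pvStepT_none pr h, PySem.Dict.get?_insert_self]
    rfl
  | some existing =>
    have hiff : (pvRank pr t.2.1 < pvRank pr (pvRawline existing) ∨
        (pvRank pr t.2.1 = pvRank pr (pvRawline existing) ∧ t.2.2 < existing))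
        ↔ pvF pr t.2.2 < pvF pr existing := by
      rw [Prod.Lex.lt_iff]
      have h1 : pvRank pr (PySem.Str.strip (pvRawline t.2.2)) = pvRank pr t.2.1 := by
        rw [← hg.1]
      have h2 : pvRank pr (PySem.Str.strip (pvRawline existing)) = pvRank pr (pvRawline existing) :=
        (hwf t.1 existing h).symm
      simp only [pvF, ofLex_toLex, h1, h2]
    rw [pvStepT_some pr h]
    split
    · next hc =>
      rw [PySem.Dict.get?_insert_self]
      simp only [pvG]
      rw [if_pos (hiff.mp hc)]
    · next hc =>
      simp only [pvG]
      rw [if_neg (fun hlt => hc (hiff.mpr hlt))]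
      exact h

lemma pv_foldA_get (pr : PySem.Dict String Int) (P : List (String × String × String))
    (hg : ∀ t ∈ P, pvGoodT pr t) :
    ∀ sel, pvWF pr sel → ∀ e,
      (P.foldl (pvStepT pr) sel).get? e
        = ((P.filter (fun t => t.1 == e)).map (fun t => t.2.2)).foldl (pvG pr) (sel.get? e) := by
  induction P with
  | nil => intro sel _ e; rfl
  | cons t P ih =>
    intro sel hwf e
    have hgt : pvGoodT pr t := hg t (List.mem_cons_self ..)
    have hgP : ∀ u ∈ P, pvGoodT pr u := fun u hu => hg u (List.mem_cons_of_mem _ hu)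
    rw [List.foldl_cons, List.filter_cons]
    by_cases he : t.1 = e
    · rw [if_pos (by simpa using he), List.map_cons, List.foldl_cons]
      rw [ih hgP _ (pvWF_step pr hgt hwf) e]
      congr 1
      rw [← he, pvStepT_get_self pr sel t hgt hwf]
    · rw [if_neg (by simpa using he)]
      rw [ih hgP _ (pvWF_step pr hgt hwf) e, pvStepT_get_ne pr sel t (fun h => he h.symm)]

lemma pvStepT_keys (pr : PySem.Dict String Int) (sel : PySem.Dict String String)
    (t : String × String × String) :
    (pvStepT pr sel t).keys = PySem.Set.add sel.keys t.1 := by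
  unfold PySem.Set.add
  rw [PySem.Set.contains_eq_decide, ← PySem.Dict.contains_eq_decide_mem_keys]
  cases h : sel.get? t.1 with
  | none =>
    have hc : sel.contains t.1 = false := (PySem.Dict.get?_eq_none_iff_contains sel t.1).mp h
    rw [pvStepT_none pr h, PySem.Dict.keys_insert_of_not_contains _ _ hc, hc]
    simp
  | some existing =>
    have hc : sel.contains t.1 = true := by
      rw [PySem.Dict.contains_eq_isSome_get?, h]; rfl
    rw [pvStepT_some pr h, hc]
    split
    · rw [PySem.Dict.keys_insert_of_contains _ _ hc]; simp
    · simp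

lemma pv_foldA_keys (pr : PySem.Dict String Int) (P : List (String × String × String)) :
    ∀ sel : PySem.Dict String String,
      (P.foldl (pvStepT pr) sel).keys = PySem.Set.update sel.keys (P.map (fun t => t.1)) := by
  induction P with
  | nil => intro sel; rfl
  | cons t P ih =>
    intro sel
    rw [List.foldl_cons, List.map_cons, ih, pvStepT_keys]
    rfl

lemma pv_min2_eq (pr : PySem.Dict String Int) (xs : List String) :
    PySem.List.min2? xs (fun k => pvRank pr (PySem.Str.strip (pvRawline k))) (fun k => k)
      = PySem.List.min? xs (pvF pr) := by
  unfold PySem.List.min2? PySem.List.min?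
  congr 1
  funext acc k
  cases acc with
  | none => rfl
  | some m =>
    simp only
    have hiff : (decide (pvRank pr (PySem.Str.strip (pvRawline k)) < pvRank pr (PySem.Str.strip (pvRawline m))) ||
        (!decide (pvRank pr (PySem.Str.strip (pvRawline m)) < pvRank pr (PySem.Str.strip (pvRawline k))) && decide (k < m))) = true
        ↔ pvF pr k < pvF pr m := by
      rw [Prod.Lex.lt_iff]
      simp only [pvF, ofLex_toLex, Bool.or_eq_true, Bool.and_eq_true, Bool.not_eq_true',
        decide_eq_true_eq, decide_eq_false_iff_not]
      constructor
      · rintro (h | ⟨h1, h2⟩)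
        · exact Or.inl h
        · rcases lt_trichotomy (pvRank pr (PySem.Str.strip (pvRawline k))) (pvRank pr (PySem.Str.strip (pvRawline m))) with h' | h' | h'
          · exact Or.inl h'
          · exact Or.inr ⟨h', h2⟩
          · exact absurd h' h1
      · rintro (h | ⟨h1, h2⟩)
        · exact Or.inl h
        · exact Or.inr ⟨by rw [h1]; exact lt_irrefl _, h2⟩
    by_cases h : pvF pr k < pvF pr m
    · rw [if_pos (hiff.mpr h), if_pos h]
    · rw [if_neg (fun hb => h (hiff.mp hb)), if_neg h]

lemma pv_sorted2_eq (xs : List (String × String)) :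
    PySem.List.sorted2 xs (fun p => p.1) (fun p => p.2) false
      = PySem.List.sorted xs (fun p => (toLex (p.1, p.2) : Lex (String × String))) false := by
  unfold PySem.List.sorted2 PySem.List.sorted
  simp only [Bool.false_eq_true, if_false]
  congr 1
  funext acc x
  congr 1
  funext a b
  have hiff : (decide (a.1 < b.1) || (!decide (b.1 < a.1) && decide (a.2 < b.2))) = true
      ↔ (toLex (a.1, a.2) : Lex (String × String)) < toLex (b.1, b.2) := by
    rw [Prod.Lex.lt_iff]
    simp only [ofLex_toLex, Bool.or_eq_true, Bool.and_eq_true, Bool.not_eq_true',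
      decide_eq_true_eq, decide_eq_false_iff_not]
    constructor
    · rintro (h | ⟨h1, h2⟩)
      · exact Or.inl h
      · rcases lt_trichotomy a.1 b.1 with h' | h' | h'
        · exact Or.inl h'
        · exact Or.inr ⟨h', h2⟩
        · exact absurd h' h1
    · rintro (h | ⟨h1, h2⟩)
      · exact Or.inl h
      · exact Or.inr ⟨by rw [h1]; exact lt_irrefl _, h2⟩
  by_cases h : (toLex (a.1, a.2) : Lex (String × String)) < toLex (b.1, b.2)
  · rw [hiff.mpr h, decide_eq_true_eq.mpr h]
  · rw [Bool.eq_false_iff.mpr (fun hb => h (hiff.mp hb)), decide_eq_false h]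

lemma pv_foldl_parseA (pr : PySem.Dict String Int) (L : List String) (init : PySem.Dict String String) :
    L.foldl
      (fun sel raw_key =>
        let key := PySem.Str.strip raw_key
        if PySem.Str.isIn "_" key then
          let parts := (PySem.Str.splitMax? key "_" 1).getD []
          let element := PySem.Str.strip (parts.getD 0 "")
          let line := PySem.Str.strip (parts.getD 1 "")
          if element = "" ∨ line = "" then sel
          else
            match sel.get? element with
            | none => sel.insert element key
            | some existing =>
              let existing_line := ((PySem.Str.splitMax? existing "_" 1).getD []).getD 1 ""
              let existing_rank := pr.getD existing_line (pr.size : Int)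
              let candidate_rank := pr.getD line (pr.size : Int)
              if candidate_rank < existing_rank ∨ (candidate_rank = existing_rank ∧ key < existing)
              then sel.insert element key else sel
        else sel)
      init
    = (L.filterMap pvParse).foldl (pvStepT pr) init := by
  induction L generalizing init with
  | nil => rfl
  | cons raw L ih =>
    rw [List.foldl_cons, List.filterMap_cons]
    have hstep := pvStepA_eq pr init raw
    rcases h : pvParse raw with _ | t
    · rw [h] at hstep
      rw [ih]
      exact congrArg (fun s => List.foldl (pvStepT pr) s (List.filterMap pvParse L)) hstep
    · rw [h] at hstep
      rw [List.foldl_cons, ih]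
      exact congrArg (fun s => List.foldl (pvStepT pr) s (List.filterMap pvParse L)) hstep

lemma pv_foldl_parseB (L : List String) (init : PySem.Dict String (List String)) :
    L.foldl
      (fun g raw_key =>
        let key := PySem.Str.strip raw_key
        if PySem.Str.isIn "_" key then
          let parts := (PySem.Str.splitMax? key "_" 1).getD []
          let element := PySem.Str.strip (parts.getD 0 "")
          let line := PySem.Str.strip (parts.getD 1 "")
          if element = "" ∨ line = "" then g
          else g.modify element [] (fun l => l ++ [key])
        else g)
      init
    = (L.filterMap pvParse).foldl (fun g t => g.modify t.1 [] (fun l => l ++ [t.2.2])) init := by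
  induction L generalizing init with
  | nil => rfl
  | cons raw L ih =>
    rw [List.foldl_cons, List.filterMap_cons]
    have hstep := pvStepB_eq init raw
    rcases h : pvParse raw with _ | t
    · rw [h] at hstep
      rw [ih]
      exact congrArg
        (fun s => List.foldl (fun g t => PySem.Dict.modify g t.1 [] (fun l => l ++ [t.2.2])) s (List.filterMap pvParse L)) hstep
    · rw [h] at hstep
      rw [List.foldl_cons, ih]
      exact congrArg
        (fun s => List.foldl (fun g t => PySem.Dict.modify g t.1 [] (fun l => l ++ [t.2.2])) s (List.filterMap pvParse L)) hstep

lemma pv_portA_eq (ref : List (String × String)) (pref : Option (List String)) :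
    derive_reference_lines_by_element ref pref
      = PySem.List.sorted2
          (((PySem.List.sorted (PySem.List.dedup (ref.map Prod.fst)) (fun x => x) false).filterMap
              pvParse).foldl (pvStepT (pvPriority pref)) PySem.Dict.empty).items
          (fun p => p.1) (fun p => p.2) false := by
  unfold derive_reference_lines_by_element
  simp only []
  rw [pv_foldl_parseA ((PySem.List.enumerate ((pref.getD []))).foldl (fun d p => d.insert p.2 p.1) PySem.Dict.empty)]
  rfl

lemma pv_portB_eq (ref : List (String × String)) (pref : Option (List String)) :
    derive_reference_lines_by_element_alt ref pref
      = (let pr := pvPriority pref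
         let PB := (PySem.List.dedup (ref.map Prod.fst)).filterMap pvParse
         let groups := PB.foldl (fun g t => g.modify t.1 [] (fun l => l ++ [t.2.2])) PySem.Dict.empty
         ((PySem.List.sorted groups.keys (fun x => x) false).foldl
           (fun d element =>
             d.insert element
               ((PySem.List.min2? (groups.getD element [])
                   (fun k => pvRank pr (PySem.Str.strip (pvRawline k))) (fun k => k)).getD ""))
           PySem.Dict.empty).items) := by
  unfold derive_reference_lines_by_element_alt
  simp only []
  rw [pv_foldl_parseB]
  rfl

theorem derive_reference_lines_by_element_spec : Claim_equal_derive_reference_lines_by_element := by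
  intro ref pref _hdom hpre
  unfold Spec_derive_reference_lines_by_element
  rw [pv_portA_eq, pv_portB_eq]
  simp only []
  set pr := pvPriority pref with hprdef
  set dd := PySem.List.dedup (ref.map Prod.fst) with hdd
  set PA := (PySem.List.sorted dd (fun x => x) false).filterMap pvParse with hPAdef
  set PB := dd.filterMap pvParse with hPBdef
  set selA := PA.foldl (pvStepT pr) PySem.Dict.empty with hselA
  set groups := PB.foldl (fun g t => g.modify t.1 [] (fun l => l ++ [t.2.2])) PySem.Dict.empty with hgroups
  -- Pre_ as a pointwise fact about parsed raw keys of the input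
  have hpre' : ∀ raw ∈ dd, ∀ t, pvParse raw = some t →
      pvRank pr (pvRawline t.2.2) = pvRank pr t.2.1 := by
    intro raw hraw t ht
    have hraw' : raw ∈ ref.map Prod.fst := (PySem.List.mem_dedup _ _).mp hraw
    obtain ⟨p, hp, hpe⟩ := List.mem_map.mp hraw'
    unfold Pre_derive_reference_lines_by_element at hpre
    rw [List.all_eq_true] at hpre
    have := hpre p hp
    rw [hpe, ht] at this
    exact beq_iff_eq.mp this
  have hgood : ∀ t ∈ PA, pvGoodT pr t := by
    intro t ht
    obtain ⟨raw, hraw, hp⟩ := List.mem_filterMap.mp ht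
    obtain ⟨e, l, k⟩ := t
    refine ⟨pvParse_shape hp, ?_⟩
    exact hpre' raw ((PySem.List.mem_sorted _ _ _ _).mp hraw) (e, l, k) hp
  have hWFempty : pvWF pr PySem.Dict.empty := by
    intro e k h
    have h' : (none : Option String) = some k := h
    simp at h'
  have hget : ∀ e, selA.get? e
      = PySem.List.min? ((PA.filter (fun t => t.1 == e)).map (fun t => t.2.2)) (pvF pr) := by
    intro e
    rw [hselA, pv_foldA_get pr PA hgood PySem.Dict.empty hWFempty e, pv_min?_eq_foldl]
    rfl
  have hkeysA : selA.keys = PySem.Set.ofList (PA.map (fun t => t.1)) := by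
    rw [hselA, pv_foldA_keys]
    rfl
  have hndA : selA.keys.Nodup := by
    rw [hkeysA]; exact PySem.Set.nodup_ofList _
  have hfoldpairs : groups
      = (PB.map (fun t => (t.1, t.2.2))).foldl
          (fun g p => g.modify p.1 [] (fun l => l ++ [p.2])) PySem.Dict.empty := by
    rw [hgroups, List.foldl_map]
  have hgetD : ∀ e, groups.getD e [] = (PB.filter (fun t => t.1 == e)).map (fun t => t.2.2) := by
    intro e
    rw [hfoldpairs, PySem.Dict.getD_foldl_modify_append, PySem.Dict.getD_empty,
      List.filter_map, List.map_map]
    rfl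
  have hkeysB : groups.keys = PySem.Set.ofList (PB.map (fun t => t.1)) := by
    rw [hfoldpairs, PySem.Dict.keys_foldl_modify_key, List.map_map]
    rfl
  have hndB : groups.keys.Nodup := by
    rw [hkeysB]; exact PySem.Set.nodup_ofList _
  have hskeysnd : (PySem.List.sorted groups.keys (fun x => x) false).Nodup :=
    (PySem.List.sorted_perm groups.keys (fun x => x) false).symm.nodup hndB
  have hPP : PA.Perm PB := List.Perm.filterMap _ (PySem.List.sorted_perm dd (fun x => x) false)
  have hval : ∀ e, selA.getD e ""
      = ((PySem.List.min2? (groups.getD e [])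
            (fun k => pvRank pr (PySem.Str.strip (pvRawline k))) (fun k => k)).getD "") := by
    intro e
    rw [PySem.Dict.getD_eq_get?_getD, hget e, pv_min2_eq, hgetD e]
    rw [pv_min?_perm pr ((hPP.filter (fun t => t.1 == e)).map (fun t => t.2.2))]
  have hitemsB : ((PySem.List.sorted groups.keys (fun x => x) false).foldl
        (fun d element =>
          d.insert element
            ((PySem.List.min2? (groups.getD element [])
                (fun k => pvRank pr (PySem.Str.strip (pvRawline k))) (fun k => k)).getD ""))
        PySem.Dict.empty).items
      = (PySem.List.sorted groups.keys (fun x => x) false).map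
          (fun e => (e, (PySem.List.min2? (groups.getD e [])
              (fun k => pvRank pr (PySem.Str.strip (pvRawline k))) (fun k => k)).getD "")) := by
    rw [PySem.Dict.items_foldl_insert_fresh _ (fun e => e) _ PySem.Dict.empty
      (fun a _ => PySem.Dict.contains_empty a) (by simpa using hskeysnd)]
    rfl
  have hitemsA : selA.items = selA.keys.map
      (fun e => (e, (PySem.List.min2? (groups.getD e [])
          (fun k => pvRank pr (PySem.Str.strip (pvRawline k))) (fun k => k)).getD "")) := by
    rw [PySem.Dict.items_eq_map_keys selA hndA ""]
    exact List.map_congr_left (fun e _ => by rw [hval e])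
  have hkeysPerm : (PySem.List.sorted groups.keys (fun x => x) false).Perm selA.keys := by
    refine (PySem.List.sorted_perm _ _ _).trans ?_
    rw [hkeysA, hkeysB]
    refine (List.perm_ext_iff_of_nodup (PySem.Set.nodup_ofList _) (PySem.Set.nodup_ofList _)).mpr ?_
    intro a
    rw [PySem.Set.mem_ofList, PySem.Set.mem_ofList]
    exact (hPP.map (fun t => t.1)).mem_iff.symm
  rw [pv_sorted2_eq, hitemsA, hitemsB]
  refine PySem.List.sorted_eq_of_perm_of_pairwise_lt _ _
    (fun p : String × String => (toLex (p.1, p.2) : Lex (String × String))) (hkeysPerm.map _) ?_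
  have hpw : List.Pairwise (· < ·) (PySem.List.sorted groups.keys (fun x => x) false) := by
    rw [hkeysB]
    exact PySem.List.sorted_ofList_pairwise_lt _
  exact hpw.map _ (fun a b hab => Prod.Lex.lt_iff.mpr (Or.inl hab))
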